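-- pv_equiv track=rewrite | github.com/JeongEon8/AlgorithmStudyinGumi | 2025년/2025 10월/10월 3주차/bmlsj/01/귤고르기.py | solution
-- ===== SOURCE A (Python) =====
-- from collections import Counter
--
-- def solution(k, tangerine):
--     answer = 0
--
--     counter = Counter(tangerine)
--     counts = sorted(counter.values(), reverse=True)
--
--     total = 0
--     for c in counts:
--         total += c
--         answer += 1
--         if total >= k:
--             break
--
--     return answer
-- ===== SOURCE B (Python) =====
-- from collections import Counter
--
-- def solution(k, tangerine):
--     # Counting sort of the frequencies into buckets, prefix sums, then a binary
--     # search (lower bound) for the first prefix >= k -- no comparison sort, no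
--     # linear greedy accumulation.
--     counter = Counter(tangerine)
--     n = len(tangerine)
--     bucket = [0] * (n + 1)
--     for c in counter.values():
--         bucket[c] += 1
--     prefix = []
--     s = 0
--     for c in range(n, 0, -1):
--         for _ in range(bucket[c]):
--             s += c
--             prefix.append(s)
--     m = len(prefix)
--     if m == 0:
--         return 0
--     if prefix[m - 1] < k:
--         return m
--     lo, hi = 0, m - 1
--     while lo < hi:
--         mid = (lo + hi) // 2
--         if prefix[mid] >= k:
--             hi = mid
--         else:
--             lo = mid + 1
--     return lo + 1
-- ===== Notes on version B (the rewrite author's own statement) =====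
-- stated objective: alternative
-- what changed: Replaces A's comparison sort plus linear greedy accumulation-with-break by a counting sort of the frequencies into buckets, a prefix-sum array, and a hand-written binary search (lower bound) for the first prefix sum >= k.
import Mathlib
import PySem

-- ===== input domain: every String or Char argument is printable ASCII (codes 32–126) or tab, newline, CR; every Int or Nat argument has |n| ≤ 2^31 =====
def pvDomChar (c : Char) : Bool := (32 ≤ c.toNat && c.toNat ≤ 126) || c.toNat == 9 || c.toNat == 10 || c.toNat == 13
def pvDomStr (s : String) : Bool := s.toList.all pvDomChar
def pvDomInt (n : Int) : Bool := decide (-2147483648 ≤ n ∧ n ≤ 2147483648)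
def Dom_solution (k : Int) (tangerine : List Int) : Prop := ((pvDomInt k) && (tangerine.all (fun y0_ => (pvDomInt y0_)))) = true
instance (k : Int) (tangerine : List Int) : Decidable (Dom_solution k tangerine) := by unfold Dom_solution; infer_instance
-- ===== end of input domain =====

-- B replaces A's comparison sort + linear greedy accumulation by a counting sort of the
-- frequencies into buckets, a prefix-sum array and a binary search (alternative algorithm).

-- ===== PORT A =====
-- A's for-loop over the descending counts, with break
def loopA (k : Int) (total answer : Int) : List Int → Int
  | [] => answer
  | c :: rest =>
    let total := total + c
    let answer := answer + 1
    if total ≥ k then answer else loopA k total answer rest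

def solution (k : Int) (tangerine : List Int) : Int :=
  let counter := PySem.Dict.counter tangerine
  let counts := PySem.List.sorted counter.values (fun x => x) true
  loopA k 0 0 counts

-- ===== PORT B =====
-- bucket[c] += 1; c is a positive occurrence count (1 ≤ c ≤ n), so Nat indexing is exact here
def bumpB (l : List Int) (c : Int) : List Int := l.set c.toNat (l.getD c.toNat 0 + 1)

-- B's inner 'for _ in range(bucket[c]): s += c; prefix.append(s)'
def innerB (c : Int) : Nat → Int → List Int → Int × List Int
  | 0, s, acc => (s, acc)
  | m + 1, s, acc => innerB c m (s + c) (acc ++ [s + c])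

-- B's outer 'for c in range(n, 0, -1)'
def outerB (bucket : List Int) : Nat → Int → List Int → Int × List Int
  | 0, s, acc => (s, acc)
  | c' + 1, s, acc =>
    let p := innerB ((c' : Int) + 1) (bucket.getD (c' + 1) 0).toNat s acc
    outerB bucket c' p.1 p.2

-- B's 'while lo < hi' binary search (lower bound); indices stay in range in B's use
def bsearchB (pref : List Int) (k : Int) (lo hi : Nat) : Nat :=
  if lo < hi then
    let mid := (lo + hi) / 2
    if pref.getD mid 0 ≥ k then bsearchB pref k lo mid
    else bsearchB pref k (mid + 1) hi
  else lo
termination_by hi - lo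
decreasing_by all_goals omega

def solution_alt (k : Int) (tangerine : List Int) : Int :=
  let counter := PySem.Dict.counter tangerine
  let n := tangerine.length
  let bucket := counter.values.foldl bumpB (List.replicate (n + 1) 0)
  let pref := (outerB bucket n 0 []).2
  let m := pref.length
  if m = 0 then 0
  else if pref.getD (m - 1) 0 < k then (m : Int)
  else (bsearchB pref k 0 (m - 1) : Int) + 1

-- ===== PRECONDITION & SPEC =====
def Spec_solution (k : Int) (tangerine : List Int) (out : Int) : Prop := out = solution_alt k tangerine
instance (k : Int) (tangerine : List Int) (out : Int) : Decidable (Spec_solution k tangerine out) := by unfold Spec_solution; infer_instance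

-- ===== CLAIM (what is proved, stated in full; the proofs are below) =====
def Claim_equal_solution : Prop := ∀ (k : Int) (tangerine : List Int), Dom_solution k tangerine → Spec_solution k tangerine (solution k tangerine)

-- ===== LEMMAS AND PROOFS =====

-- the descending list of counts that B's bucket walk effectively traverses
def descListP (bucket : List Int) : Nat → List Int
  | 0 => []
  | c + 1 => List.replicate (bucket.getD (c + 1) 0).toNat ((c : Int) + 1) ++ descListP bucket c

-- 1-based running prefix sums starting from s
def psumsP (s : Int) : List Int → List Int
  | [] => []
  | c :: t => (s + c) :: psumsP (s + c) t

theorem psumsP_length (L : List Int) : ∀ s, (psumsP s L).length = L.length := by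
  induction L with
  | nil => intro s; rfl
  | cons c t ih => intro s; simp [psumsP, ih]

theorem psumsP_append (L1 L2 : List Int) :
    ∀ s, psumsP s (L1 ++ L2) = psumsP s L1 ++ psumsP (s + L1.sum) L2 := by
  induction L1 with
  | nil => intro s; simp [psumsP]
  | cons c t ih => intro s; simp [psumsP, ih]; ring_nf

theorem innerB_spec (c : Int) (m : Nat) :
    ∀ (s : Int) (acc : List Int),
      innerB c m s acc = (s + m * c, acc ++ psumsP s (List.replicate m c)) := by
  induction m with
  | zero => intro s acc; simp [innerB, psumsP]
  | succ m ih =>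
    intro s acc
    simp only [List.replicate_succ, psumsP, innerB, ih, Prod.mk.injEq]
    refine ⟨by push_cast; ring, by simp⟩

theorem outerB_spec (bucket : List Int) :
    ∀ (c : Nat) (s : Int) (acc : List Int),
      outerB bucket c s acc = (s + (descListP bucket c).sum, acc ++ psumsP s (descListP bucket c)) := by
  intro c
  induction c with
  | zero => intro s acc; simp [outerB, descListP, psumsP]
  | succ c ih =>
    intro s acc
    simp only [outerB, descListP, innerB_spec, ih, psumsP_append, List.sum_append,
      List.sum_replicate, nsmul_eq_mul, Prod.mk.injEq]
    refine ⟨by ring, by simp [List.append_assoc]⟩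

-- counting-sort correctness: the bucket walk yields exactly the reverse-sorted counts
theorem count_descListP (bucket : List Int) (c : Nat) (x : Int) :
    List.count x (descListP bucket c) =
      if 1 ≤ x ∧ x ≤ (c : Int) then (bucket.getD x.toNat 0).toNat else 0 := by
  induction c with
  | zero =>
    simp only [descListP, List.count_nil]
    split_ifs with h
    · omega
    · rfl
  | succ c ih =>
    simp only [descListP, List.count_append, List.count_replicate, ih, beq_iff_eq,
      Nat.cast_add, Nat.cast_one]
    split_ifs with h1 h2 h2 <;> try omega
    have e : x.toNat = c + 1 := by omega
    rw [e]
    omega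

theorem mem_descListP_le (bucket : List Int) (c : Nat) :
    ∀ y ∈ descListP bucket c, y ≤ (c : Int) := by
  induction c with
  | zero => simp [descListP]
  | succ c ih =>
    intro y hy
    simp only [descListP, List.mem_append, List.mem_replicate] at hy
    rcases hy with ⟨-, rfl⟩ | hy
    · push_cast; omega
    · have := ih y hy; push_cast; omega

theorem pairwise_descListP (bucket : List Int) (c : Nat) :
    (descListP bucket c).Pairwise (fun a b => b ≤ a) := by
  induction c with
  | zero => simp [descListP]
  | succ c ih =>
    simp only [descListP]
    rw [List.pairwise_append]
    refine ⟨?_, ih, ?_⟩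
    · rw [List.pairwise_replicate]; exact Or.inr (le_refl _)
    · intro a ha b hb
      rw [List.mem_replicate] at ha
      have hble := mem_descListP_le bucket c b hb
      obtain ⟨-, rfl⟩ := ha
      omega

theorem bucket_foldl_spec (n : Nat) :
    ∀ (l acc : List Int), acc.length = n + 1 → (∀ v ∈ l, 1 ≤ v ∧ v ≤ (n : Int)) →
      (l.foldl bumpB acc).length = n + 1 ∧
      ∀ j : Nat, j ≤ n → (l.foldl bumpB acc).getD j 0 = acc.getD j 0 + (l.count (j : Int) : Int) := by
  intro l
  induction l with
  | nil => intro acc hlen _; simpa using hlen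
  | cons v l ih =>
    intro acc hlen hb
    have hv := hb v (by simp)
    have hvn : v.toNat ≤ n := by omega
    have hlen' : (bumpB acc v).length = n + 1 := by simp [bumpB, hlen]
    obtain ⟨h1, h2⟩ := ih (bumpB acc v) hlen' (fun x hx => hb x (by simp [hx]))
    refine ⟨by simpa using h1, ?_⟩
    intro j hj
    rw [List.foldl_cons, h2 j hj]
    have hget : (bumpB acc v).getD j 0 =
        acc.getD j 0 + (if v = (j : Int) then 1 else 0) := by
      simp only [bumpB, List.getD, List.getElem?_set]
      by_cases hij : v.toNat = j
      · have hvj : v = (j : Int) := by omega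
        simp [hvj, hlen, Nat.lt_succ_of_le (hij ▸ hvn)]
      · have hvj : ¬ v = (j : Int) := by omega
        simp [hij, hvj]
    rw [hget, List.count_cons]
    by_cases hvj : v = (j : Int)
    · simp [hvj]; ring
    · simp [hvj]

theorem values_counter_bounds (t : List Int) :
    ∀ v ∈ (PySem.Dict.counter t).values, 1 ≤ v ∧ v ≤ (t.length : Int) := by
  intro v hv
  have : (PySem.Dict.counter t).values = (PySem.Dict.counter t).items.map (·.2) := rfl
  rw [this, PySem.Dict.items_counter] at hv
  simp only [List.map_map, List.mem_map, Function.comp] at hv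
  obtain ⟨key, hk, rfl⟩ := hv
  rw [PySem.Set.mem_ofList] at hk
  have h1 : 1 ≤ List.count key t := List.count_pos_iff.mpr hk
  have h2 : List.count key t ≤ t.length := List.count_le_length
  constructor <;> [exact_mod_cast h1; exact_mod_cast h2]

theorem descListP_eq_sorted (t : List Int) :
    descListP ((PySem.Dict.counter t).values.foldl bumpB (List.replicate (t.length + 1) 0)) t.length
      = PySem.List.sorted (PySem.Dict.counter t).values (fun x => x) true := by
  have hb := values_counter_bounds t
  obtain ⟨-, hspec⟩ := bucket_foldl_spec t.length (PySem.Dict.counter t).values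
      (List.replicate (t.length + 1) 0) (by simp) hb
  have hperm : (descListP ((PySem.Dict.counter t).values.foldl bumpB
      (List.replicate (t.length + 1) 0)) t.length).Perm (PySem.Dict.counter t).values := by
    rw [List.perm_iff_count]
    intro x
    rw [count_descListP]
    by_cases hx : 1 ≤ x ∧ x ≤ (t.length : Int)
    · have hxn : x.toNat ≤ t.length := by omega
      have hs := hspec x.toNat hxn
      rw [List.getD_replicate (0 : Int) (by omega)] at hs
      have hxx : ((x.toNat : Int)) = x := by omega
      rw [hxx] at hs
      rw [if_pos hx, hs]
      omega
    · rw [if_neg hx]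
      symm
      rw [List.count_eq_zero]
      intro hmem
      exact hx (hb x hmem)
  have hsorted : (PySem.List.sorted (PySem.Dict.counter t).values (fun x => x) true).Pairwise
      (fun a b : Int => b ≤ a) :=
    PySem.List.sorted_pairwise_rev (PySem.Dict.counter t).values (fun x => x)
  exact (hperm.trans (PySem.List.sorted_perm (PySem.Dict.counter t).values
      (fun x => x) true).symm).eq_of_pairwise
    (fun a b _ _ h1 h2 => le_antisymm h2 h1)
    (pairwise_descListP _ t.length) hsorted

-- every prefix sum over positive entries exceeds its start
theorem psumsP_gt (L : List Int) (hpos : ∀ c ∈ L, 1 ≤ c) :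
    ∀ s, ∀ x ∈ psumsP s L, s < x := by
  induction L with
  | nil => simp [psumsP]
  | cons c t ih =>
    intro s x hx
    have hc := hpos c (by simp)
    rcases (by simpa [psumsP] using hx : x = s + c ∨ x ∈ psumsP (s + c) t) with rfl | hx'
    · omega
    · have := ih (fun d hd => hpos d (by simp [hd])) (s + c) x hx'
      omega

theorem psumsP_pairwise (L : List Int) (hpos : ∀ c ∈ L, 1 ≤ c) :
    ∀ s, (psumsP s L).Pairwise (· ≤ ·) := by
  induction L with
  | nil => simp [psumsP]
  | cons c t ih =>
    intro s
    simp only [psumsP, List.pairwise_cons]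
    refine ⟨fun x hx => ?_, ih (fun d hd => hpos d (by simp [hd])) (s + c)⟩
    have := psumsP_gt t (fun d hd => hpos d (by simp [hd])) (s + c) x hx
    omega

-- monotone getD access from Pairwise
theorem psumsP_mono (p : List Int) (hp : p.Pairwise (· ≤ ·)) :
    ∀ i j : Nat, i ≤ j → j < p.length → p.getD i 0 ≤ p.getD j 0 := by
  intro i j hij hj
  rcases Nat.lt_or_ge i j with h | h
  · have := (List.pairwise_iff_getElem.mp hp) i j (by omega) hj h
    simpa [List.getD, List.getElem?_eq_getElem, Nat.lt_of_lt_of_le h (Nat.le_of_lt hj),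
      List.getElem?_eq_getElem (by omega : i < p.length), hj] using this
  · have : i = j := by omega
    subst this; rfl

-- A's loop computed from the prefix sums: length of the '< k' prefix, plus one if it stopped early
theorem loopA_psums (k : Int) (L : List Int) :
    ∀ (s a : Int),
      loopA k s a L =
        a + (((psumsP s L).takeWhile (fun x => decide (x < k))).length : Int) +
          (if ((psumsP s L).takeWhile (fun x => decide (x < k))).length < L.length then 1 else 0) := by
  induction L with
  | nil => intro s a; simp [loopA, psumsP]
  | cons c t ih =>
    intro s a
    simp only [loopA, psumsP, List.takeWhile_cons]
    by_cases h : s + c ≥ k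
    · have : ¬ (s + c < k) := by omega
      simp [this]
    · have hlt : s + c < k := by omega
      simp only [hlt, decide_true, if_true, List.length_cons]
      rw [if_neg (by omega), ih]
      have hlen : ((psumsP (s + c) t).takeWhile (fun x => decide (x < k))).length ≤ t.length := by
        calc ((psumsP (s + c) t).takeWhile (fun x => decide (x < k))).length
            ≤ (psumsP (s + c) t).length := (List.takeWhile_prefix _).length_le
          _ = t.length := psumsP_length t (s + c)
      by_cases hc : ((psumsP (s + c) t).takeWhile (fun x => decide (x < k))).length < t.length
      · rw [if_pos hc, if_pos (by omega)]; push_cast; ring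
      · rw [if_neg hc, if_neg (by omega)]; push_cast; omega

-- takeWhile length from a first-witness description
theorem takeWhile_length_eq (k : Int) (p : List Int) :
    ∀ j : Nat, (∀ i : Nat, i < j → p.getD i 0 < k) → j < p.length → ¬ (p.getD j 0 < k) →
      (p.takeWhile (fun x => decide (x < k))).length = j := by
  induction p with
  | nil => intro j _ hj _; simp at hj
  | cons c t ih =>
    intro j hlt hj hge
    cases j with
    | zero =>
      have h0 : ¬ (c < k) := by simpa [List.getD] using hge
      simp [h0]
    | succ j =>
      have h0 : c < k := by simpa [List.getD] using hlt 0 (by omega)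
      rw [List.takeWhile_cons, if_pos (by simpa using h0), List.length_cons]
      have := ih j (fun i hi => by simpa [List.getD] using hlt (i + 1) (by omega))
        (by simpa using hj) (by simpa [List.getD] using hge)
      omega

theorem takeWhile_length_all (k : Int) (p : List Int) (h : ∀ x ∈ p, x < k) :
    (p.takeWhile (fun x => decide (x < k))).length = p.length := by
  rw [List.takeWhile_eq_self_iff.mpr (fun x hx => by simpa using h x hx)]

-- the binary search returns the first index whose prefix sum reaches k
theorem bsearchB_spec (p : List Int) (k : Int) (hmono : p.Pairwise (· ≤ ·)) :
    ∀ fuel lo hi : Nat, hi - lo ≤ fuel → lo ≤ hi → hi < p.length →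
      (∀ i : Nat, i < lo → p.getD i 0 < k) → ¬ (p.getD hi 0 < k) →
      (∀ i : Nat, i < bsearchB p k lo hi → p.getD i 0 < k) ∧
        ¬ (p.getD (bsearchB p k lo hi) 0 < k) ∧ bsearchB p k lo hi < p.length := by
  intro fuel
  induction fuel with
  | zero =>
    intro lo hi hf hle hhi hlo hge
    have : lo = hi := by omega
    subst this
    rw [bsearchB]
    simp only [Nat.lt_irrefl, if_false]
    exact ⟨hlo, hge, hhi⟩
  | succ fuel ih =>
    intro lo hi hf hle hhi hlo hge
    rw [bsearchB]
    by_cases hlh : lo < hi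
    · simp only [hlh, if_true]
      by_cases hmid : p.getD ((lo + hi) / 2) 0 ≥ k
      · simp only [hmid, if_pos]
        exact ih lo ((lo + hi) / 2) (by omega) (by omega) (by omega) hlo (by omega)
      · rw [if_neg hmid]
        refine ih ((lo + hi) / 2 + 1) hi (by omega) (by omega) hhi ?_ hge
        intro i hi'
        rcases Nat.lt_or_ge i lo with h | h
        · exact hlo i h
        · have := psumsP_mono p hmono i ((lo + hi) / 2) (by omega) (by omega)
          omega
    · simp only [hlh, if_false]
      have : lo = hi := by omega
      subst this
      exact ⟨hlo, hge, hhi⟩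

-- ===== VERDICT (by name: the statement is the Claim_ definition above) =====
theorem solution_spec : Claim_equal_solution := by
  intro k t _
  unfold Spec_solution solution solution_alt
  simp only [outerB_spec, descListP_eq_sorted, List.nil_append]
  set L := PySem.List.sorted (PySem.Dict.counter t).values (fun x => x) true with hL
  have hposL : ∀ c ∈ L, 1 ≤ c := by
    intro c hc
    have hmem : c ∈ (PySem.Dict.counter t).values :=
      (PySem.List.sorted_perm (PySem.Dict.counter t).values (fun x => x) true).mem_iff.mp hc
    exact (values_counter_bounds t c hmem).1
  set p := psumsP 0 L with hp
  have hplen : p.length = L.length := psumsP_length L 0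
  have hmono : p.Pairwise (· ≤ ·) := psumsP_pairwise L hposL 0
  rw [loopA_psums]
  by_cases hm : p.length = 0
  · simp [hm, List.length_eq_zero_iff.mp (hplen ▸ hm), psumsP]
  · rw [if_neg hm]
    by_cases hlast : p.getD (p.length - 1) 0 < k
    · rw [if_pos hlast]
      have hall : ∀ x ∈ p, x < k := by
        intro x hx
        obtain ⟨i, hi, hgi⟩ := List.mem_iff_getElem.mp hx
        have hgd : p.getD i 0 = x := by simp [List.getD, List.getElem?_eq_getElem hi, hgi]
        have := psumsP_mono p hmono i (p.length - 1) (by omega) (by omega)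
        omega
      rw [takeWhile_length_all k p hall, hplen, if_neg (by omega)]
      ring
    · rw [if_neg hlast]
      obtain ⟨h1, h2, h3⟩ := bsearchB_spec p k hmono (p.length - 1) 0 (p.length - 1)
        (le_refl _) (by omega) (by omega) (by omega) hlast
      rw [takeWhile_length_eq k p (bsearchB p k 0 (p.length - 1)) h1 h3 h2]
      rw [if_pos (by omega)]
      ring
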